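-- pv_equiv track=rewrite | github.com/yu20120707/stackpilot | app/services/knowledge_base.py | _score_document
-- ===== SOURCE A (Python) =====
-- def _score_document(content: str, query_terms: set[str]) -> tuple[int, str]:
--     normalized_content = content.lower()
--     matched_terms = [term for term in query_terms if term in normalized_content]
--     if not matched_terms:
--         return 0, ""
--
--     score = sum(min(len(term), 8) for term in matched_terms)
--     best_term = min(
--         matched_terms,
--         key=lambda term: (normalized_content.find(term), -len(term)),
--     )
--     return score, best_term
-- ===== SOURCE B (Python) =====
-- def _score_document(content: str, query_terms: set[str]) -> tuple[int, str]:
--     # Position-driven scan: walk the content left to right; at each position collect the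
--     # terms whose first occurrence starts there. The first position with any hit yields the
--     # best term directly (the longest term starting there); the score accumulates as terms
--     # are found, without ever calling find()/in.
--     nc = content.lower()
--     remaining = list(query_terms)
--     score = 0
--     best = None
--     for i in range(len(nc) + 1):
--         hit = [t for t in remaining if nc.startswith(t, i)]
--         if hit:
--             if best is None:
--                 best = max(hit, key=len)
--             for t in hit:
--                 score += min(len(t), 8)
--             remaining = [t for t in remaining if not nc.startswith(t, i)]
--     if best is None:
--         return 0, ""
--     return score, best
-- ===== Notes on version B (the rewrite author's own statement) =====
-- stated objective: alternative
-- what changed: A scans term-by-term with substring find()/in over the whole content; B scans the content position-by-position, collecting at each index the still-unseen terms that start there, so the first hit position directly yields the best term (longest term starting there) and the score accumulates as terms are first found.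
import Mathlib
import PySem

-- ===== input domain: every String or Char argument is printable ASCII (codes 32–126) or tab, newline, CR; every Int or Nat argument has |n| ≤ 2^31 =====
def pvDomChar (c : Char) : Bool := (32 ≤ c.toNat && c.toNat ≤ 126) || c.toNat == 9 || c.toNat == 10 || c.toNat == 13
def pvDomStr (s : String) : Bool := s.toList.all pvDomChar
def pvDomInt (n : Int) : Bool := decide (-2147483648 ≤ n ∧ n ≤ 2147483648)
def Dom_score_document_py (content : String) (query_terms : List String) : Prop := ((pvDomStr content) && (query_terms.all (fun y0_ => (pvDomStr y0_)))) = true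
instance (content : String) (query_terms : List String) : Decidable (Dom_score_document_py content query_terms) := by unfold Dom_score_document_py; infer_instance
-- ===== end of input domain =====

-- B replaces A's term-driven find()/in scans by a position-driven left-to-right scan of the
-- content that collects each term at its first occurrence (alternative algorithm, no speed claim).

-- ===== PORT A =====
def score_document_py (content : String) (query_terms : List String) : Int × String :=
  let nc := PySem.Str.lower content
  let matched := query_terms.filter (fun term => PySem.Str.isIn term nc)
  if matched = [] then (0, "")
  else
    ((matched.map (fun term => min (PySem.Str.len term) 8)).sum,
     (PySem.List.min2? matched (fun term => PySem.Str.find nc term)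
        (fun term => -(PySem.Str.len term))).getD "")

-- ===== PORT B =====
-- body of Source B's position loop: state = (score, best, remaining), position i
def pvStepB (cs : List Char) (st : Int × Option String × List String) (i : Nat) :
    Int × Option String × List String :=
  let hit := st.2.2.filter (fun t => PySem.Chars.startswith (List.drop i cs) t.toList)
  if hit = [] then st
  else
    (st.1 + (hit.map (fun t => min (PySem.Str.len t) 8)).sum,
     (match st.2.1 with
      | some b => some b
      | none => PySem.List.max? hit (fun t => PySem.Str.len t)),
     st.2.2.filter (fun t => !PySem.Chars.startswith (List.drop i cs) t.toList))

def score_document_py_alt (content : String) (query_terms : List String) : Int × String :=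
  let cs := (PySem.Str.lower content).toList
  let st := (List.range (cs.length + 1)).foldl (pvStepB cs) (0, none, query_terms)
  match st.2.1 with
  | none => (0, "")
  | some b => (st.1, b)

-- ===== PRECONDITION & SPEC =====
def Spec_score_document_py (content : String) (query_terms : List String) (out : Int × String) : Prop := out = score_document_py_alt content query_terms
instance (content : String) (query_terms : List String) (out : Int × String) : Decidable (Spec_score_document_py content query_terms out) := by unfold Spec_score_document_py; infer_instance

-- ===== CLAIM (what is proved, stated in full; the proofs are below) =====
def Claim_equal_score_document_py : Prop := ∀ (content : String) (query_terms : List String), Dom_score_document_py content query_terms → Spec_score_document_py content query_terms (score_document_py content query_terms)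

-- ===== LEMMAS AND PROOFS =====

-- first-occurrence index of a term in the (lowered) content
def pvF (cs : List Char) (t : String) : Int := PySem.Chars.find cs t.toList
-- "first occurrence strictly before position i"
def pvMLt (cs : List Char) (i : Nat) (t : String) : Bool :=
  decide (0 ≤ pvF cs t ∧ pvF cs t < (i : Int))
-- score accumulated after processing positions 0..i-1
def pvS (cs : List Char) (ts : List String) (i : Nat) : Int :=
  ((ts.filter (pvMLt cs i)).map (fun t => min (PySem.Str.len t) 8)).sum
-- remaining terms after processing positions 0..i-1
def pvR (cs : List Char) (ts : List String) (i : Nat) : List String :=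
  ts.filter (fun t => !pvMLt cs i t)
-- minimal first-occurrence index over the matched terms (init = content length)
def pvMinF (cs : List Char) (ts : List String) : Int :=
  ((ts.map (pvF cs)).filter (fun v => decide (0 ≤ v))).foldl min (cs.length : Int)
-- best term after processing positions 0..i-1
def pvBst (cs : List Char) (ts : List String) (i : Nat) : Option String :=
  if ts.filter (pvMLt cs i) = [] then none
  else PySem.List.max? (ts.filter (fun t => decide (pvF cs t = pvMinF cs ts)))
         (fun t => PySem.Str.len t)

lemma pvF_nonneg_le_of_start {cs : List Char} {t : String} {i : Nat}
    (h : PySem.Chars.startswith (List.drop i cs) t.toList = true) :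
    0 ≤ pvF cs t ∧ pvF cs t ≤ (i : Int) := by
  have hp : t.toList <+: cs.drop i := (PySem.Chars.startswith_iff _ _).mp h
  have hinf : t.toList <:+: cs := hp.isInfix.trans (List.drop_suffix i cs).isInfix
  have h0 : 0 ≤ pvF cs t := (PySem.Chars.find_nonneg_iff cs t.toList).mpr hinf
  refine ⟨h0, ?_⟩
  by_contra hlt
  have hlt' : (i : Int) < pvF cs t := by omega
  have hspec := (PySem.Chars.find_spec (s := cs) (sub := t.toList) h0).2 i (by
    show i < (PySem.Chars.find cs t.toList).toNat
    have : (i : Int) < PySem.Chars.find cs t.toList := hlt'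
    omega)
  exact hspec hp

lemma pvStart_of_find_eq {cs : List Char} {t : String} {i : Nat}
    (h0 : 0 ≤ pvF cs t) (he : pvF cs t = (i : Int)) :
    PySem.Chars.startswith (List.drop i cs) t.toList = true := by
  have hsp := (PySem.Chars.find_spec (s := cs) (sub := t.toList) h0).1
  have hi : (PySem.Chars.find cs t.toList).toNat = i := by
    have : pvF cs t = (i : Int) := he
    simp only [pvF] at this
    omega
  rw [hi] at hsp
  exact (PySem.Chars.startswith_iff _ _).mpr hsp

-- at position i, a still-remaining term matches exactly when its first occurrence is i
lemma pvHit_eq (cs : List Char) (i : Nat) (t : String) :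
    (!pvMLt cs i t && PySem.Chars.startswith (List.drop i cs) t.toList)
      = decide (pvF cs t = (i : Int)) := by
  by_cases hs : PySem.Chars.startswith (List.drop i cs) t.toList = true
  · obtain ⟨h0, hle⟩ := pvF_nonneg_le_of_start hs
    by_cases he : pvF cs t = (i : Int)
    · have : ¬ (0 ≤ pvF cs t ∧ pvF cs t < (i : Int)) := by omega
      simp [pvMLt, hs, he]
    · have hlt : pvF cs t < (i : Int) := lt_of_le_of_ne hle he
      have : (0 ≤ pvF cs t ∧ pvF cs t < (i : Int)) := ⟨h0, hlt⟩
      simp [pvMLt, hs, he, this]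
  · have hs' : PySem.Chars.startswith (List.drop i cs) t.toList = false :=
      Bool.eq_false_iff.mpr hs
    by_cases he : pvF cs t = (i : Int)
    · exact absurd (pvStart_of_find_eq (by omega) he) hs
    · simp [hs', he]

lemma pvRem_eq (cs : List Char) (i : Nat) (t : String) :
    (!pvMLt cs i t && !PySem.Chars.startswith (List.drop i cs) t.toList)
      = !pvMLt cs (i + 1) t := by
  by_cases hs : PySem.Chars.startswith (List.drop i cs) t.toList = true
  · obtain ⟨h0, hle⟩ := pvF_nonneg_le_of_start hs
    have : (0 ≤ pvF cs t ∧ pvF cs t < ((i : Nat) + 1 : Int)) := by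
      constructor
      · exact h0
      · omega
    simp [pvMLt, hs, this]
  · have hs' : PySem.Chars.startswith (List.drop i cs) t.toList = false :=
      Bool.eq_false_iff.mpr hs
    have hne : ¬ pvF cs t = (i : Int) := fun he =>
      hs (pvStart_of_find_eq (by omega) he)
    have hiff : (0 ≤ pvF cs t ∧ pvF cs t < ((i + 1 : Nat) : Int))
        ↔ (0 ≤ pvF cs t ∧ pvF cs t < (i : Int)) := by omega
    have hdd : decide (0 ≤ pvF cs t ∧ pvF cs t < ((i + 1 : Nat) : Int))
        = decide (0 ≤ pvF cs t ∧ pvF cs t < (i : Int)) := decide_eq_decide.mpr hiff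
    rw [hs']
    simp only [Bool.not_false, Bool.and_true]
    exact congrArg Bool.not hdd.symm

-- a sum over a filter splits along two disjoint predicates
lemma pvSum_split (c : String → Int) (p q r : String → Bool)
    (h : ∀ x, r x = (p x || q x)) (hd : ∀ x, ¬(p x = true ∧ q x = true)) :
    ∀ xs : List String,
      ((xs.filter r).map c).sum = ((xs.filter p).map c).sum + ((xs.filter q).map c).sum := by
  intro xs
  induction xs with
  | nil => simp
  | cons x xs ih =>
    rcases hp : p x <;> rcases hq : q x
    · simp [h x, hp, hq, ih]
    · simp [h x, hp, hq, ih]; ring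
    · simp [h x, hp, hq, ih]; ring
    · exact absurd ⟨hp, hq⟩ (hd x)

lemma pvMinF_eq (cs : List Char) (ts : List String) (i : Nat) (hi : i ≤ cs.length)
    (hall : ∀ t ∈ ts, ¬ pvMLt cs i t = true)
    (hex : ∃ t ∈ ts, pvF cs t = (i : Int)) :
    pvMinF cs ts = (i : Int) := by
  obtain ⟨t0, ht0, hft0⟩ := hex
  have hmem : (i : Int) ∈ (ts.map (pvF cs)).filter (fun v => decide (0 ≤ v)) := by
    rw [List.mem_filter]
    exact ⟨hft0 ▸ List.mem_map_of_mem ht0, by simp⟩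
  have hub := (PySem.List.foldl_min_le
      ((ts.map (pvF cs)).filter (fun v => decide (0 ≤ v))) (cs.length : Int)).2 _ hmem
  have hlb : ∀ v ∈ (ts.map (pvF cs)).filter (fun v => decide (0 ≤ v)), (i : Int) ≤ v := by
    intro v hv
    rw [List.mem_filter] at hv
    obtain ⟨t', ht', hvt⟩ := List.mem_map.mp hv.1
    have h0 : (0 : Int) ≤ v := by simpa using hv.2
    have := hall t' ht'
    simp only [pvMLt, decide_eq_true_eq] at this
    subst hvt
    omega
  have hub' : pvMinF cs ts ≤ (i : Int) := hub
  rcases PySem.List.foldl_min_mem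
      ((ts.map (pvF cs)).filter (fun v => decide (0 ≤ v))) (cs.length : Int) with hc | hc
  · have h1 : pvMinF cs ts = (cs.length : Int) := hc
    omega
  · have h1 : (i : Int) ≤ pvMinF cs ts := hlb _ hc
    omega

lemma pvMinF_nonneg_le (cs : List Char) (ts : List String) :
    0 ≤ pvMinF cs ts ∧ pvMinF cs ts ≤ (cs.length : Int) := by
  constructor
  · rcases PySem.List.foldl_min_mem
        ((ts.map (pvF cs)).filter (fun v => decide (0 ≤ v))) (cs.length : Int) with hc | hc
    · rw [pvMinF, hc]; positivity
    · have : decide (0 ≤ ((ts.map (pvF cs)).filter (fun v => decide (0 ≤ v))).foldl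
          min (cs.length : Int)) = true := (List.mem_filter.mp hc).2
      rw [pvMinF]
      simpa using this
  · exact (PySem.List.foldl_min_le _ _).1

-- one loop iteration advances the invariant state from i to i+1
lemma pvStep_inv (cs : List Char) (ts : List String) (i : Nat) (hi : i ≤ cs.length) :
    pvStepB cs (pvS cs ts i, pvBst cs ts i, pvR cs ts i) i
      = (pvS cs ts (i + 1), pvBst cs ts (i + 1), pvR cs ts (i + 1)) := by
  have hhit : (pvR cs ts i).filter (fun t => PySem.Chars.startswith (List.drop i cs) t.toList)
      = ts.filter (fun t => decide (pvF cs t = (i : Int))) := by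
    rw [pvR, List.filter_filter]
    exact List.filter_congr (fun t _ => by rw [Bool.and_comm]; exact pvHit_eq cs i t)
  have hrem : (pvR cs ts i).filter (fun t => !PySem.Chars.startswith (List.drop i cs) t.toList)
      = pvR cs ts (i + 1) := by
    rw [pvR, List.filter_filter, pvR]
    exact List.filter_congr (fun t _ => by rw [Bool.and_comm]; exact pvRem_eq cs i t)
  by_cases hH : ts.filter (fun t => decide (pvF cs t = (i : Int))) = []
  · have hnone : ∀ t ∈ ts, ¬ pvF cs t = (i : Int) := by
      intro t ht
      have := List.filter_eq_nil_iff.mp hH t ht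
      simpa using this
    have hpt : ∀ t ∈ ts, pvMLt cs (i + 1) t = pvMLt cs i t := by
      intro t ht
      have := hnone t ht
      simp only [pvMLt]
      exact decide_eq_decide.mpr (by omega)
    have hsame : ts.filter (pvMLt cs (i + 1)) = ts.filter (pvMLt cs i) :=
      List.filter_congr hpt
    have hsame' : pvR cs ts (i + 1) = pvR cs ts i := by
      rw [pvR, pvR]
      exact List.filter_congr (fun t ht => by rw [hpt t ht])
    simp only [pvStepB]
    rw [hhit, hH, if_pos rfl,
      show pvS cs ts (i + 1) = pvS cs ts i from by simp only [pvS]; rw [hsame],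
      show pvBst cs ts (i + 1) = pvBst cs ts i from by simp only [pvBst]; rw [hsame],
      hsame']
  · simp only [pvStepB, hhit, if_neg hH]
    have hscore : pvS cs ts i
        + ((ts.filter (fun t => decide (pvF cs t = (i : Int)))).map
            (fun t => min (PySem.Str.len t) 8)).sum = pvS cs ts (i + 1) := by
      rw [pvS, pvS, pvSum_split (fun t => min (PySem.Str.len t) 8)
        (pvMLt cs i) (fun t => decide (pvF cs t = (i : Int))) (pvMLt cs (i + 1))
        (fun t => by
          have h1 : (0 ≤ pvF cs t ∧ pvF cs t < ((i + 1 : Nat) : Int))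
              ↔ ((0 ≤ pvF cs t ∧ pvF cs t < (i : Int)) ∨ pvF cs t = (i : Int)) := by omega
          rw [Bool.eq_iff_iff]
          simp only [pvMLt, Bool.or_eq_true, decide_eq_true_eq]
          exact h1)
        (fun t => by
          simp only [pvMLt, decide_eq_true_eq]
          rintro ⟨hh1, hh2⟩; omega) ts]
    obtain ⟨t1, ht1m⟩ := List.exists_mem_of_ne_nil _ hH
    have ht1 : t1 ∈ ts ∧ pvF cs t1 = (i : Int) := by
      have := List.mem_filter.mp ht1m
      exact ⟨this.1, by simpa using this.2⟩
    have hnext_ne : ts.filter (pvMLt cs (i + 1)) ≠ [] := by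
      intro hc
      have := List.filter_eq_nil_iff.mp hc t1 ht1.1
      simp only [pvMLt, decide_eq_true_eq] at this
      exact this ⟨by omega, by omega⟩
    by_cases hB : ts.filter (pvMLt cs i) = []
    · have hall : ∀ t ∈ ts, ¬ pvMLt cs i t = true := List.filter_eq_nil_iff.mp hB
      have hmf : pvMinF cs ts = (i : Int) :=
        pvMinF_eq cs ts i hi hall ⟨t1, ht1.1, ht1.2⟩
      rw [hscore, hrem, pvBst, pvBst, if_pos hB, if_neg hnext_ne, hmf]
    · have hb : pvBst cs ts i = PySem.List.max?
          (ts.filter (fun t => decide (pvF cs t = pvMinF cs ts))) (fun t => PySem.Str.len t) := by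
        rw [pvBst, if_neg hB]
      have hb' : pvBst cs ts (i + 1) = PySem.List.max?
          (ts.filter (fun t => decide (pvF cs t = pvMinF cs ts))) (fun t => PySem.Str.len t) := by
        rw [pvBst, if_neg hnext_ne]
      rw [hscore, hrem, hb, hb']
      obtain ⟨t0, ht0⟩ := List.exists_mem_of_ne_nil _ hB
      obtain ⟨ht0s, ht0m⟩ := List.mem_filter.mp ht0
      have h0' : 0 ≤ pvF cs t0 ∧ pvF cs t0 < (i : Int) := by
        simpa [pvMLt] using ht0m
      have hminle : pvMinF cs ts ≤ pvF cs t0 :=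
        (PySem.List.foldl_min_le _ (cs.length : Int)).2 _
          (List.mem_filter.mpr ⟨List.mem_map_of_mem ht0s, by simp [h0'.1]⟩)
      have hatt : ∃ t' ∈ ts, pvF cs t' = pvMinF cs ts := by
        rcases PySem.List.foldl_min_mem
            ((ts.map (pvF cs)).filter (fun v => decide (0 ≤ v))) (cs.length : Int) with hc | hc
        · exfalso
          have h1 : pvMinF cs ts = (cs.length : Int) := hc
          omega
        · obtain ⟨hmap, _⟩ := List.mem_filter.mp hc
          obtain ⟨t', ht', hvt⟩ := List.mem_map.mp hmap
          exact ⟨t', ht', hvt⟩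
      obtain ⟨t', ht', hvt⟩ := hatt
      have hXne : ts.filter (fun t => decide (pvF cs t = pvMinF cs ts)) ≠ [] := by
        intro hc
        have := List.filter_eq_nil_iff.mp hc t' ht'
        simp [hvt] at this
      rcases hmax : PySem.List.max?
          (ts.filter (fun t => decide (pvF cs t = pvMinF cs ts)))
          (fun t => PySem.Str.len t) with _ | b
      · exact absurd ((PySem.List.max?_eq_none_iff _ _).mp hmax) hXne
      · rfl

-- the loop over positions 0..n-1 computes the invariant state
lemma pvFold (cs : List Char) (ts : List String) :
    ∀ n, n ≤ cs.length + 1 →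
      (List.range n).foldl (pvStepB cs) (0, none, ts) = (pvS cs ts n, pvBst cs ts n, pvR cs ts n) := by
  intro n
  induction n with
  | zero =>
    intro _
    have h0 : ts.filter (pvMLt cs 0) = [] :=
      List.filter_eq_nil_iff.mpr (fun t _ => by
        simp only [pvMLt, decide_eq_true_eq]
        omega)
    have hS : pvS cs ts 0 = 0 := by
      simp only [pvS]
      rw [h0]
      rfl
    have hB : pvBst cs ts 0 = none := by
      simp only [pvBst]
      rw [if_pos h0]
    have hR : pvR cs ts 0 = ts := by
      simp only [pvR]
      exact List.filter_eq_self.mpr (fun t _ => by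
        simp only [pvMLt, Bool.not_eq_true', decide_eq_false_iff_not]
        omega)
    rw [List.range_zero, List.foldl_nil, hS, hB, hR]
  | succ n ih =>
    intro hn
    rw [List.range_succ, List.foldl_append, ih (by omega), List.foldl_cons, List.foldl_nil,
      pvStep_inv cs ts n (by omega)]

-- min2?'s fold step / max?'s fold step, written out
def pvMinStep (cs : List Char) : Option String → String → Option String := fun acc x =>
  match acc with
  | none => some x
  | some m =>
    if (decide (pvF cs x < pvF cs m)
        || (!decide (pvF cs m < pvF cs x)
            && decide (-(PySem.Str.len x) < -(PySem.Str.len m)))) = true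
    then some x else some m

def pvMaxStep : Option String → String → Option String := fun acc x =>
  match acc with
  | none => some x
  | some m => if PySem.Str.len m < PySem.Str.len x then some x else some m

def pvFStep (cs : List Char) (p : Int) : Option String → String → Option String := fun acc x =>
  if pvF cs x = p then pvMaxStep acc x else acc

lemma pvMin2_eq (nc : String) (xs : List String) :
    PySem.List.min2? xs (fun t => PySem.Str.find nc t) (fun t => -(PySem.Str.len t))
      = xs.foldl (pvMinStep nc.toList) none := by
  simp only [PySem.List.min2?]
  congr 1
  funext acc x
  cases acc <;> rfl

lemma pvMax_eq (xs : List String) :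
    PySem.List.max? xs (fun t => PySem.Str.len t) = xs.foldl pvMaxStep none := by
  simp only [PySem.List.max?]
  congr 1
  funext acc x
  cases acc <;> rfl

-- relation between the two best-selection folds: the min2? accumulator agrees with the
-- filtered max-by-length accumulator exactly once an element at the minimal position was seen
def pvRel (cs : List Char) (p : Int) (a b : Option String) : Prop :=
  (a = none ∧ b = none)
  ∨ (∃ m, a = some m ∧ pvF cs m = p ∧ b = some m)
  ∨ (∃ m, a = some m ∧ p < pvF cs m ∧ b = none)

lemma pvCond_iff (a b c d : Int) :
    (decide (a < b) || (!decide (b < a) && decide (c < d))) = true ↔ (a < b ∨ (a = b ∧ c < d)) := by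
  simp only [Bool.or_eq_true, Bool.and_eq_true, Bool.not_eq_eq_eq_not, Bool.not_true,
    decide_eq_true_eq, decide_eq_false_iff_not]
  omega

lemma pvMinStep_some (cs : List Char) (x m : String) :
    pvMinStep cs (some m) x =
      if pvF cs x < pvF cs m ∨ (pvF cs x = pvF cs m ∧ -(PySem.Str.len x) < -(PySem.Str.len m))
      then some x else some m := by
  simp only [pvMinStep]
  by_cases h : pvF cs x < pvF cs m ∨ (pvF cs x = pvF cs m ∧ -(PySem.Str.len x) < -(PySem.Str.len m))
  · rw [if_pos ((pvCond_iff _ _ _ _).mpr h), if_pos h]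
  · rw [if_neg (fun hc => h ((pvCond_iff _ _ _ _).mp hc)), if_neg h]

lemma pvMaxStep_some (x m : String) :
    pvMaxStep (some m) x = if PySem.Str.len m < PySem.Str.len x then some x else some m := rfl

lemma pvLstep (cs : List Char) (p : Int) (x : String) (a b : Option String)
    (hx : p ≤ pvF cs x) (h : pvRel cs p a b) :
    pvRel cs p (pvMinStep cs a x) (pvFStep cs p b x) := by
  rcases h with ⟨ha, hb⟩ | ⟨m, ha, hm, hb⟩ | ⟨m, ha, hm, hb⟩
  · subst ha; subst hb
    by_cases he : pvF cs x = p
    · exact Or.inr (Or.inl ⟨x, rfl, he, by simp only [pvFStep]; rw [if_pos he]; rfl⟩)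
    · exact Or.inr (Or.inr ⟨x, rfl, by omega, by simp only [pvFStep]; rw [if_neg he]⟩)
  · subst ha; subst hb
    by_cases he : pvF cs x = p
    · by_cases hl : PySem.Str.len m < PySem.Str.len x
      · refine Or.inr (Or.inl ⟨x, ?_, he, ?_⟩)
        · rw [pvMinStep_some, if_pos (Or.inr ⟨by omega, by omega⟩)]
        · simp only [pvFStep]; rw [if_pos he, pvMaxStep_some, if_pos hl]
      · refine Or.inr (Or.inl ⟨m, ?_, hm, ?_⟩)
        · rw [pvMinStep_some, if_neg (by rintro (hc | ⟨-, hc⟩) <;> omega)]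
        · simp only [pvFStep]; rw [if_pos he, pvMaxStep_some, if_neg hl]
    · refine Or.inr (Or.inl ⟨m, ?_, hm, ?_⟩)
      · rw [pvMinStep_some, if_neg (by rintro (hc | ⟨hc, -⟩) <;> omega)]
      · simp only [pvFStep]; rw [if_neg he]
  · subst ha; subst hb
    by_cases he : pvF cs x = p
    · refine Or.inr (Or.inl ⟨x, ?_, he, ?_⟩)
      · rw [pvMinStep_some, if_pos (Or.inl (by omega))]
      · simp only [pvFStep]; rw [if_pos he]; rfl
    · refine Or.inr (Or.inr ?_)
      rw [pvMinStep_some]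
      by_cases hc : pvF cs x < pvF cs m ∨ (pvF cs x = pvF cs m ∧ -(PySem.Str.len x) < -(PySem.Str.len m))
      · refine ⟨x, by rw [if_pos hc], by omega, ?_⟩
        simp only [pvFStep]; rw [if_neg he]
      · refine ⟨m, by rw [if_neg hc], hm, ?_⟩
        simp only [pvFStep]; rw [if_neg he]

lemma pvLstep_hit (cs : List Char) (p : Int) (x : String) (a b : Option String)
    (he : pvF cs x = p) (h : pvRel cs p a b) :
    ∃ m, pvMinStep cs a x = some m ∧ pvF cs m = p ∧ pvFStep cs p b x = some m := by
  rcases h with ⟨ha, hb⟩ | ⟨m, ha, hm, hb⟩ | ⟨m, ha, hm, hb⟩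
  · subst ha; subst hb
    exact ⟨x, rfl, he, by simp only [pvFStep]; rw [if_pos he]; rfl⟩
  · subst ha; subst hb
    by_cases hl : PySem.Str.len m < PySem.Str.len x
    · refine ⟨x, ?_, he, ?_⟩
      · rw [pvMinStep_some, if_pos (Or.inr ⟨by omega, by omega⟩)]
      · simp only [pvFStep]; rw [if_pos he, pvMaxStep_some, if_pos hl]
    · refine ⟨m, ?_, hm, ?_⟩
      · rw [pvMinStep_some, if_neg (by rintro (hc | ⟨-, hc⟩) <;> omega)]
      · simp only [pvFStep]; rw [if_pos he, pvMaxStep_some, if_neg hl]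
  · subst ha; subst hb
    refine ⟨x, ?_, he, ?_⟩
    · rw [pvMinStep_some, if_pos (Or.inl (by omega))]
    · simp only [pvFStep]; rw [if_pos he]; rfl

lemma pvLabs_step (cs : List Char) (p : Int) (x m : String)
    (hx : p ≤ pvF cs x) (hm : pvF cs m = p) :
    ∃ m', pvMinStep cs (some m) x = some m' ∧ pvF cs m' = p
      ∧ pvFStep cs p (some m) x = some m' := by
  by_cases he : pvF cs x = p
  · by_cases hl : PySem.Str.len m < PySem.Str.len x
    · refine ⟨x, ?_, he, ?_⟩
      · rw [pvMinStep_some, if_pos (Or.inr ⟨by omega, by omega⟩)]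
      · simp only [pvFStep]; rw [if_pos he, pvMaxStep_some, if_pos hl]
    · refine ⟨m, ?_, hm, ?_⟩
      · rw [pvMinStep_some, if_neg (by rintro (hc | ⟨-, hc⟩) <;> omega)]
      · simp only [pvFStep]; rw [if_pos he, pvMaxStep_some, if_neg hl]
  · refine ⟨m, ?_, hm, ?_⟩
    · rw [pvMinStep_some, if_neg (by rintro (hc | ⟨hc, -⟩) <;> omega)]
    · simp only [pvFStep]; rw [if_neg he]

lemma pvLabs (cs : List Char) (p : Int) :
    ∀ (xs : List String), (∀ y ∈ xs, p ≤ pvF cs y) → ∀ m, pvF cs m = p →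
      ∃ m', xs.foldl (pvMinStep cs) (some m) = some m' ∧ pvF cs m' = p
        ∧ xs.foldl (pvFStep cs p) (some m) = some m' := by
  intro xs
  induction xs with
  | nil => exact fun _ m hm => ⟨m, rfl, hm, rfl⟩
  | cons z zs ih =>
    intro hlb m hm
    rw [List.foldl_cons, List.foldl_cons]
    obtain ⟨m', h1, h2, h3⟩ := pvLabs_step cs p z m (hlb z List.mem_cons_self) hm
    rw [h1, h3]
    exact ih (fun y hy => hlb y (List.mem_cons_of_mem _ hy)) m' h2

lemma pvLhit (cs : List Char) (p : Int) :
    ∀ (xs : List String), (∀ y ∈ xs, p ≤ pvF cs y) → (∃ y ∈ xs, pvF cs y = p) →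
      ∀ a b, pvRel cs p a b →
        ∃ m, xs.foldl (pvMinStep cs) a = some m ∧ pvF cs m = p
          ∧ xs.foldl (pvFStep cs p) b = some m := by
  intro xs
  induction xs with
  | nil =>
    rintro _ ⟨y, hy, _⟩ _ _ _
    simp at hy
  | cons y ys ih =>
    intro hlb hex a b h
    rw [List.foldl_cons, List.foldl_cons]
    by_cases he : pvF cs y = p
    · obtain ⟨m, hm1, hm2, hm3⟩ := pvLstep_hit cs p y a b he h
      rw [hm1, hm3]
      exact pvLabs cs p ys (fun z hz => hlb z (List.mem_cons_of_mem _ hz)) m hm2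
    · have hex' : ∃ z ∈ ys, pvF cs z = p := by
        rcases hex with ⟨z, hz, hzp⟩
        rcases List.mem_cons.mp hz with rfl | hz'
        · exact absurd hzp he
        · exact ⟨z, hz', hzp⟩
      exact ih (fun z hz => hlb z (List.mem_cons_of_mem _ hz)) hex' _ _
        (pvLstep cs p y a b (hlb y List.mem_cons_self) h)

-- A's matched predicate is "first occurrence before position len+1"
lemma pvMatched_eq (content : String) (ts : List String) :
    ts.filter (fun term => PySem.Str.isIn term (PySem.Str.lower content))
      = ts.filter (pvMLt (PySem.Str.lower content).toList ((PySem.Str.lower content).toList.length + 1)) := by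
  refine List.filter_congr (fun t _ => ?_)
  set cs := (PySem.Str.lower content).toList with hcs
  have hlen := PySem.Chars.find_le_length cs t.toList
  by_cases hin : PySem.Str.isIn t (PySem.Str.lower content) = true
  · have : t.toList <:+: cs := by
      have := (PySem.Str.isIn_iff_infix t (PySem.Str.lower content)).mp hin
      simpa [hcs] using this
    have h0 : 0 ≤ pvF cs t := (PySem.Chars.find_nonneg_iff cs t.toList).mpr this
    have : (0 ≤ pvF cs t ∧ pvF cs t < ((cs.length + 1 : Nat) : Int)) := by
      constructor
      · exact h0
      · have : pvF cs t ≤ (cs.length : Int) := hlen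
        push_cast
        omega
    rw [hin]
    exact (decide_eq_true this).symm
  · have hneg : ¬ t.toList <:+: cs := by
      intro hc
      exact hin ((PySem.Str.isIn_iff_infix t (PySem.Str.lower content)).mpr (by simpa [hcs] using hc))
    have h0 : ¬ 0 ≤ pvF cs t := by
      intro hc
      exact hneg ((PySem.Chars.find_nonneg_iff cs t.toList).mp hc)
    have hin' : PySem.Str.isIn t (PySem.Str.lower content) = false := Bool.eq_false_iff.mpr hin
    rw [hin']
    exact (decide_eq_false (fun hh => h0 hh.1)).symm

-- ===== VERDICT (by name: the statement is the Claim_ definition above) =====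
theorem score_document_py_spec : Claim_equal_score_document_py := by
  intro content ts _
  unfold Spec_score_document_py
  simp only [score_document_py, score_document_py_alt]
  rw [pvMatched_eq content ts,
    pvFold (PySem.Str.lower content).toList ts ((PySem.Str.lower content).toList.length + 1) le_rfl]
  set cs := (PySem.Str.lower content).toList with hcs
  set n := cs.length + 1 with hn
  by_cases hm : ts.filter (pvMLt cs n) = []
  · rw [if_pos hm]
    have : pvBst cs ts n = none := by rw [pvBst, if_pos hm]
    rw [this]
  · rw [if_neg hm]
    have hBst : pvBst cs ts n = PySem.List.max?
        (ts.filter (fun t => decide (pvF cs t = pvMinF cs ts))) (fun t => PySem.Str.len t) := by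
      rw [pvBst, if_neg hm]
    obtain ⟨hp0, hpl⟩ := pvMinF_nonneg_le cs ts
    have hlb : ∀ t ∈ ts.filter (pvMLt cs n), pvMinF cs ts ≤ pvF cs t := by
      intro t ht
      obtain ⟨hts, hmlt⟩ := List.mem_filter.mp ht
      have h0 : 0 ≤ pvF cs t := by
        simp only [pvMLt, decide_eq_true_eq] at hmlt
        exact hmlt.1
      have hmem : pvF cs t ∈ (ts.map (pvF cs)).filter (fun v => decide (0 ≤ v)) :=
        List.mem_filter.mpr ⟨List.mem_map_of_mem hts, by simpa using h0⟩
      exact (PySem.List.foldl_min_le _ (cs.length : Int)).2 _ hmem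
    have hex : ∃ t ∈ ts.filter (pvMLt cs n), pvF cs t = pvMinF cs ts := by
      rcases PySem.List.foldl_min_mem
          ((ts.map (pvF cs)).filter (fun v => decide (0 ≤ v))) (cs.length : Int) with hc | hc
      · obtain ⟨t0, ht0⟩ := List.exists_mem_of_ne_nil _ hm
        refine ⟨t0, ht0, ?_⟩
        have h1 := hlb t0 ht0
        have h2 : pvF cs t0 ≤ (cs.length : Int) := PySem.Chars.find_le_length cs t0.toList
        have h3 : pvMinF cs ts = (cs.length : Int) := hc
        omega
      · obtain ⟨hmap, hge⟩ := List.mem_filter.mp hc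
        obtain ⟨t', ht', hvt⟩ := List.mem_map.mp hmap
        refine ⟨t', List.mem_filter.mpr ⟨ht', ?_⟩, hvt⟩
        have h2 : pvF cs t' ≤ (cs.length : Int) := PySem.Chars.find_le_length cs t'.toList
        have h3 : pvF cs t' = pvMinF cs ts := hvt
        simp only [pvMLt, decide_eq_true_eq]
        constructor
        · omega
        · rw [hn]; push_cast; omega
    have hfilter : ts.filter (fun t => decide (pvF cs t = pvMinF cs ts))
        = (ts.filter (pvMLt cs n)).filter (fun t => decide (pvF cs t = pvMinF cs ts)) := by
      rw [List.filter_filter]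
      refine List.filter_congr (fun t _ => ?_)
      by_cases he : pvF cs t = pvMinF cs ts
      · have : pvMLt cs n t = true := by
          simp only [pvMLt, decide_eq_true_eq]
          constructor
          · omega
          · rw [hn]; push_cast; omega
        simp [he, this]
      · simp [he]
    obtain ⟨m, hA, hkey, hB⟩ := pvLhit cs (pvMinF cs ts) (ts.filter (pvMLt cs n)) hlb hex
      none none (Or.inl ⟨rfl, rfl⟩)
    have hBfold : (ts.filter (pvMLt cs n)).foldl (pvFStep cs (pvMinF cs ts)) none
        = ((ts.filter (pvMLt cs n)).filter
            (fun t => decide (pvF cs t = pvMinF cs ts))).foldl pvMaxStep none := by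
      exact PySem.List.foldl_ite_eq_foldl_filter
        (fun x => pvF cs x = pvMinF cs ts) pvMaxStep _ _
    have hBst' : pvBst cs ts n = some m := by
      rw [hBst, hfilter, pvMax_eq, ← hBfold, hB]
    rw [hBst', pvMin2_eq, ← hcs, hA]
    rfl
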